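-- pv_equiv track=rewrite | github.com/uiuc-sst/g2ps | g2ppy/features/df.py | find_unigraphs_in_dictdict
-- ===== SOURCE A (Python) =====
-- from collections import defaultdict
--
-- def find_unigraphs_in_dictdict(dictdict):
--     '''Find the unigraphs in a list of distinctive feature specifiers'''
--     found = {}
--     missing = defaultdict(list)
--     for (p,row) in dictdict.items():
--         if len(p)==1:
--             found[p] = row
--         else:
--             for c in p:
--                 if c not in found:
--                     missing[c].append(row)
--     for c in found:
--         if c in missing:
--             del missing[c]
--     return(found,missing)
-- ===== SOURCE B (Python) =====
-- from collections import defaultdict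
--
-- def find_unigraphs_in_dictdict(dictdict):
--     '''Find the unigraphs in a list of distinctive feature specifiers'''
--     found = {p: row for p, row in dictdict.items() if len(p) == 1}
--     pairs = [(c, row) for p, row in dictdict.items() if len(p) != 1
--              for c in p if c not in found]
--     missing = defaultdict(list)
--     for c in dict.fromkeys(c for c, _ in pairs):
--         missing[c] = [row for c2, row in pairs if c2 == c]
--     return (found, missing)
-- ===== Notes on version B (the rewrite author's own statement) =====
-- stated objective: alternative
-- what changed: B replaces A's incremental dict-of-appends plus final cleanup/delete pass by a staged group-by: build the complete `found` first, flatten the multigraphs into an explicit (char,row) pair list already filtered against the complete `found`, and then construct `missing` key-by-key (first-occurrence key order, one comprehension per key) instead of appending row-by-row.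
import Mathlib
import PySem

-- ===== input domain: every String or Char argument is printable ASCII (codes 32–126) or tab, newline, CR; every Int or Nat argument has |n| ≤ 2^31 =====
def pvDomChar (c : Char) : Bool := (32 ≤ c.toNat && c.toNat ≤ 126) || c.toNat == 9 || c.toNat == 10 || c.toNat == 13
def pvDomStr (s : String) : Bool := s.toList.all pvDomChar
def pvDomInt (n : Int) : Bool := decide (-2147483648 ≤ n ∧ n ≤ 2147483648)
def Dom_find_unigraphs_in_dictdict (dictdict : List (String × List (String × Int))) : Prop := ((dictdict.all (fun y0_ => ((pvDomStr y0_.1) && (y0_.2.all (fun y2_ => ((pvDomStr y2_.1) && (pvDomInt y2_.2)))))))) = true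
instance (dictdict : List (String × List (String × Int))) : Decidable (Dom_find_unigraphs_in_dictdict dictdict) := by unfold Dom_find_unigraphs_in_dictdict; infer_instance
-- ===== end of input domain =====

-- B replaces A's incremental dict-of-appends plus cleanup pass by a staged group-by over an
-- explicit (char,row) pair list filtered against the complete `found` (objective: alternative).

-- ===== PORT A =====
-- the two loop bodies of A, named so the proofs can speak about them
def pvStepAChar (found : PySem.Dict String (List (String × Int))) (row : List (String × Int))
    (m : PySem.Dict String (List (List (String × Int)))) (c : Char) :
    PySem.Dict String (List (List (String × Int))) :=
  if found.contains (String.ofList [c]) then m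
  else m.modify (String.ofList [c]) [] (fun v => v ++ [row])   -- missing[c].append(row) on a defaultdict(list)

def pvStepA
    (st : PySem.Dict String (List (String × Int)) × PySem.Dict String (List (List (String × Int))))
    (pr : String × List (String × Int)) :
    PySem.Dict String (List (String × Int)) × PySem.Dict String (List (List (String × Int))) :=
  if PySem.Str.len pr.1 == 1 then (st.1.insert pr.1 pr.2, st.2)
  else (st.1, pr.1.toList.foldl (pvStepAChar st.1 pr.2) st.2)

def find_unigraphs_in_dictdict (dictdict : List (String × List (String × Int))) :
    (List (String × List (String × Int))) × (List (String × List (List (String × Int)))) :=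
  let st := dictdict.foldl pvStepA (PySem.Dict.empty, PySem.Dict.empty)
  -- for c in found: if c in missing: del missing[c]
  let missing := st.1.keys.foldl (fun m c => if m.contains c then m.erase c else m) st.2
  (st.1.items, missing.items)

-- ===== PORT B =====
def find_unigraphs_in_dictdict_alt (dictdict : List (String × List (String × Int))) :
    (List (String × List (String × Int))) × (List (String × List (List (String × Int)))) :=
  -- found = {p: row ... if len(p)==1}
  let found := dictdict.filter (fun pr => PySem.Str.len pr.1 == 1)
  let ks := found.map Prod.fst
  -- pairs = [(c,row) for p,row ... if len(p)!=1 for c in p if c not in found]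
  let pairs := (dictdict.filter (fun pr => PySem.Str.len pr.1 != 1)).flatMap
    (fun pr => (pr.1.toList.filter (fun c => !(ks.contains (String.ofList [c])))).map
      (fun c => (String.ofList [c], pr.2)))
  -- for c in dict.fromkeys(...): missing[c] = [row for c2,row in pairs if c2 == c]
  let missing := (PySem.Set.ofList (pairs.map Prod.fst)).map
    (fun c => (c, (pairs.filter (fun q => q.1 == c)).map Prod.snd))
  (found, missing)

-- ===== PRECONDITION & SPEC =====
-- Pre_ excludes association lists with duplicate top-level keys: dictdict ports a Python dict,
-- which cannot hold two equal keys, so such lists represent no input A is ever called on.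
def Pre_find_unigraphs_in_dictdict (dictdict : List (String × List (String × Int))) : Prop :=
  (dictdict.map Prod.fst).Nodup
instance (dictdict : List (String × List (String × Int))) : Decidable (Pre_find_unigraphs_in_dictdict dictdict) := by unfold Pre_find_unigraphs_in_dictdict; infer_instance

def pvWitness_find_unigraphs_in_dictdict : (List (String × List (String × Int))) :=
  [("a", [("x", 1)]), ("bc", [("y", 2)])]

def Spec_find_unigraphs_in_dictdict (dictdict : List (String × List (String × Int))) (out : (List (String × List (String × Int))) × (List (String × List (List (String × Int))))) : Prop := out = find_unigraphs_in_dictdict_alt dictdict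
instance (dictdict : List (String × List (String × Int))) (out : (List (String × List (String × Int))) × (List (String × List (List (String × Int))))) : Decidable (Spec_find_unigraphs_in_dictdict dictdict out) := by unfold Spec_find_unigraphs_in_dictdict; infer_instance

-- ===== CLAIM (what is proved, stated in full; the proofs are below) =====
def Claim_equal_find_unigraphs_in_dictdict : Prop := ∀ (dictdict : List (String × List (String × Int))), Dom_find_unigraphs_in_dictdict dictdict → Pre_find_unigraphs_in_dictdict dictdict → Spec_find_unigraphs_in_dictdict dictdict (find_unigraphs_in_dictdict dictdict)

-- ===== LEMMAS AND PROOFS =====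

-- keep the entries whose key is not a unigraph key
def pvKeep (K : List String) (p : String × List (List (String × Int))) : Bool := !(K.contains p.1)

-- what missing[c].append(row) does to the items list (nodup keys)
def pvAppRow (xs : List (String × List (List (String × Int)))) (k : String) (row : List (String × Int)) :
    List (String × List (List (String × Int))) :=
  if xs.any (fun p => p.1 == k) then xs.map (fun p => if p.1 == k then (k, p.2 ++ [row]) else p)
  else xs ++ [(k, [row])]

def pvPureChar (K : List String) (row : List (String × Int))
    (xs : List (String × List (List (String × Int)))) (c : Char) :
    List (String × List (List (String × Int))) :=
  if K.contains (String.ofList [c]) then xs else pvAppRow xs (String.ofList [c]) row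

def pvPure (K : List String) (dd : List (String × List (String × Int)))
    (xs : List (String × List (List (String × Int)))) :
    List (String × List (List (String × Int))) :=
  dd.foldl (fun xs pr => if PySem.Str.len pr.1 == 1 then xs
    else pr.1.toList.foldl (pvPureChar K pr.2) xs) xs

-- B's pair list (the comprehension in the port), and the pure fold/group-by it denotes
def pvPairs (K : List String) (dd : List (String × List (String × Int))) :
    List (String × List (String × Int)) :=
  (dd.filter (fun pr => PySem.Str.len pr.1 != 1)).flatMap
    (fun pr => (pr.1.toList.filter (fun c => !(K.contains (String.ofList [c])))).map
      (fun c => (String.ofList [c], pr.2)))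

def pvFold (L : List (String × List (String × Int)))
    (xs : List (String × List (List (String × Int)))) :
    List (String × List (List (String × Int))) :=
  L.foldl (fun xs q => pvAppRow xs q.1 q.2) xs

def pvGroup (L : List (String × List (String × Int))) :
    List (String × List (List (String × Int))) :=
  (PySem.Set.ofList (L.map Prod.fst)).map
    (fun c => (c, (L.filter (fun q => q.1 == c)).map Prod.snd))

lemma pv_pure_cons_single (K : List String) (pr : String × List (String × Int))
    (dd : List (String × List (String × Int))) (xs : List (String × List (List (String × Int))))
    (hs : (PySem.Str.len pr.1 == 1) = true) :
    pvPure K (pr :: dd) xs = pvPure K dd xs := by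
  unfold pvPure; rw [List.foldl_cons, if_pos hs]

lemma pv_pure_cons_multi (K : List String) (pr : String × List (String × Int))
    (dd : List (String × List (String × Int))) (xs : List (String × List (List (String × Int))))
    (hs : (PySem.Str.len pr.1 == 1) = false) :
    pvPure K (pr :: dd) xs = pvPure K dd (pr.1.toList.foldl (pvPureChar K pr.2) xs) := by
  unfold pvPure; rw [List.foldl_cons, if_neg (by rw [hs]; exact Bool.false_ne_true)]

lemma pv_modify_items (m : PySem.Dict String (List (List (String × Int)))) (k : String)
    (row : List (String × Int)) (h : m.keys.Nodup) :
    (m.modify k [] (fun v => v ++ [row])).items = pvAppRow m.items k row := by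
  by_cases hc : m.contains k = true
  · have hany : m.items.any (fun p => p.1 == k) = true := hc
    simp only [PySem.Dict.modify, PySem.Dict.items_insert, hc, if_pos, pvAppRow, hany]
    apply List.map_congr_left
    intro p hp
    by_cases hk : (p.1 == k) = true
    · have hpk : p.1 = k := eq_of_beq hk
      have hmem : (k, p.2) ∈ m.items := by rw [← hpk]; exact hp
      have := PySem.Dict.getD_of_mem_items m hmem h ([] : List (List (String × Int)))
      simp [hk, this]
    · simp [hk]
  · have hc' : m.contains k = false := by simpa using hc
    have hany : m.items.any (fun p => p.1 == k) = false := hc'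
    simp [PySem.Dict.modify, PySem.Dict.items_insert, hc', pvAppRow, hany,
      PySem.Dict.getD_of_not_contains m _ hc']

lemma pv_nodup_keys_modify (m : PySem.Dict String (List (List (String × Int)))) (k : String)
    (d0 : List (List (String × Int))) (f : List (List (String × Int)) → List (List (String × Int)))
    (h : m.keys.Nodup) : (m.modify k d0 f).keys.Nodup := by
  rw [PySem.Dict.keys_modify]
  by_cases hc : m.contains k = true
  · rw [PySem.Dict.keys_insert_of_contains _ _ hc]; exact h
  · have hc' : m.contains k = false := by simpa using hc
    rw [PySem.Dict.keys_insert_of_not_contains _ _ hc']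
    have hk : k ∉ m.keys := by
      intro hmem
      exact absurd ((PySem.Dict.contains_iff_mem_keys m k).2 hmem) (by simp [hc'])
    have hdisj : m.keys.Disjoint [k] := by
      intro a ha hb
      rw [List.mem_singleton] at hb
      exact hk (hb ▸ ha)
    exact List.Nodup.append h (List.nodup_singleton k) hdisj

lemma pv_cleanup_items : ∀ (ks : List String) (m : PySem.Dict String (List (List (String × Int)))),
    (ks.foldl (fun m c => if m.contains c then m.erase c else m) m).items
      = m.items.filter (fun p => !(ks.contains p.1)) := by
  intro ks
  induction ks with
  | nil => intro m; simp
  | cons c ks ih =>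
    intro m
    by_cases hc : m.contains c = true
    · have hfold : (List.foldl (fun m c => if m.contains c then m.erase c else m) m (c :: ks))
          = List.foldl (fun m c => if m.contains c then m.erase c else m) (m.erase c) ks := by
        simp [hc]
      rw [hfold, ih]
      show (m.erase c).items.filter _ = _
      simp only [PySem.Dict.erase, List.filter_filter]
      apply List.filter_congr
      intro p _
      by_cases hpk : p.1 = c <;> simp [hpk, Bool.and_comm]
    · have hc' : m.contains c = false := by simpa using hc
      have hfold : (List.foldl (fun m c => if m.contains c then m.erase c else m) m (c :: ks))
          = List.foldl (fun m c => if m.contains c then m.erase c else m) m ks := by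
        simp [hc']
      rw [hfold, ih]
      apply List.filter_congr
      intro p hp
      have hne : (p.1 == c) = false := by
        have := (List.any_eq_false).1 hc' p hp
        simpa using this
      have hne' : ¬ p.1 = c := by intro hh; rw [hh] at hne; simp at hne
      simp [hne']

lemma pv_filter_map (K : List String) (k : String) (row : List (String × Int)) :
    ∀ (xs : List (String × List (List (String × Int)))),
      (xs.map (fun p => if p.1 == k then (k, p.2 ++ [row]) else p)).filter (pvKeep K)
        = (xs.filter (pvKeep K)).map (fun p => if p.1 == k then (k, p.2 ++ [row]) else p) := by
  intro xs
  induction xs with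
  | nil => simp
  | cons p xs ih =>
    rw [List.map_cons, List.filter_cons, List.filter_cons]
    by_cases hk : (p.1 == k) = true
    · have hpk : p.1 = k := eq_of_beq hk
      rw [if_pos hk]
      by_cases hP : pvKeep K p = true
      · have hP2 : pvKeep K (k, p.2 ++ [row]) = true := by
          unfold pvKeep at hP ⊢; rw [← hpk]; exact hP
        rw [if_pos hP2, if_pos hP, List.map_cons, if_pos hk, ih]
      · have hP2 : ¬ pvKeep K (k, p.2 ++ [row]) = true := by
          unfold pvKeep at hP ⊢; rw [← hpk]; exact hP
        rw [if_neg hP2, if_neg hP, ih]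
    · rw [if_neg hk]
      by_cases hP : pvKeep K p = true
      · rw [if_pos hP, if_pos hP, List.map_cons, if_neg hk, ih]
      · rw [if_neg hP, if_neg hP, ih]

lemma pv_filter_appRow_neg (K : List String) (xs : List (String × List (List (String × Int))))
    (k : String) (row : List (String × Int)) (hk : K.contains k = true) :
    (pvAppRow xs k row).filter (pvKeep K) = xs.filter (pvKeep K) := by
  have hkm : k ∈ K := List.contains_iff_mem.1 hk
  unfold pvAppRow
  by_cases ha : xs.any (fun p => p.1 == k) = true
  · rw [if_pos ha, pv_filter_map]
    have hid : ∀ p ∈ xs.filter (pvKeep K),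
        (if p.1 == k then (k, p.2 ++ [row]) else p) = id p := by
      intro p hp
      have hPp : pvKeep K p = true := (List.mem_filter.1 hp).2
      have hne : ¬ (p.1 == k) = true := by
        intro hcon
        rw [pvKeep, eq_of_beq hcon] at hPp
        simp [hkm] at hPp
      rw [if_neg hne]; rfl
    rw [List.map_congr_left hid, List.map_id]
  · rw [if_neg ha, List.filter_append]
    have hP2 : pvKeep K (k, [row]) = false := by simp [pvKeep, hkm]
    simp [hP2]

lemma pv_any_filter (K : List String) (k : String) (hk : K.contains k = false) :
    ∀ (xs : List (String × List (List (String × Int)))),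
      (xs.filter (pvKeep K)).any (fun p => p.1 == k) = xs.any (fun p => p.1 == k) := by
  intro xs
  induction xs with
  | nil => simp
  | cons p xs ih =>
    by_cases hpk : (p.1 == k) = true
    · have hpk' : p.1 = k := eq_of_beq hpk
      have hkm : k ∉ K := by intro hm; rw [List.contains_iff_mem.2 hm] at hk; simp at hk
      have hP : pvKeep K p = true := by simp [pvKeep, hpk', hkm]
      simp [hP, hpk, ih]
    · by_cases hP : pvKeep K p = true
      · simp [hP, hpk, ih]
      · have hP' : pvKeep K p = false := by simpa using hP
        simp [hP', hpk, ih]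

lemma pv_filter_appRow_pos (K : List String) (xs : List (String × List (List (String × Int))))
    (k : String) (row : List (String × Int)) (hk : K.contains k = false) :
    (pvAppRow xs k row).filter (pvKeep K) = pvAppRow (xs.filter (pvKeep K)) k row := by
  unfold pvAppRow
  rw [pv_any_filter K k hk xs]
  by_cases ha : xs.any (fun p => p.1 == k) = true
  · rw [if_pos ha, if_pos ha, pv_filter_map]
  · have hkm : k ∉ K := by intro hm; rw [List.contains_iff_mem.2 hm] at hk; simp at hk
    rw [if_neg ha, if_neg ha, List.filter_append]
    have hP2 : pvKeep K (k, [row]) = true := by simp [pvKeep, hkm]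
    simp [hP2]

lemma pv_A_chars (K : List String) (F : PySem.Dict String (List (String × Int)))
    (row : List (String × Int))
    (hF : ∀ s, F.contains s = true → K.contains s = true) :
    ∀ (cs : List Char) (M : PySem.Dict String (List (List (String × Int)))), M.keys.Nodup →
      ((cs.foldl (pvStepAChar F row) M).items.filter (pvKeep K)
          = cs.foldl (pvPureChar K row) (M.items.filter (pvKeep K))
        ∧ (cs.foldl (pvStepAChar F row) M).keys.Nodup) := by
  intro cs
  induction cs with
  | nil => intro M hM; exact ⟨rfl, hM⟩
  | cons c cs ih =>
    intro M hM
    by_cases hK : K.contains (String.ofList [c]) = true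
    · by_cases hFc : F.contains (String.ofList [c]) = true
      · have hstep : pvStepAChar F row M c = M := by unfold pvStepAChar; rw [if_pos hFc]
        have hpure : pvPureChar K row (M.items.filter (pvKeep K)) c = M.items.filter (pvKeep K) := by
          unfold pvPureChar; rw [if_pos hK]
        rw [List.foldl_cons, List.foldl_cons, hstep, hpure]
        exact ih M hM
      · have hstep : pvStepAChar F row M c = M.modify (String.ofList [c]) [] (fun v => v ++ [row]) := by
          unfold pvStepAChar; rw [if_neg hFc]
        have hnd := pv_nodup_keys_modify M (String.ofList [c]) [] (fun v => v ++ [row]) hM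
        have hitems : (M.modify (String.ofList [c]) [] (fun v => v ++ [row])).items.filter (pvKeep K)
            = M.items.filter (pvKeep K) := by
          rw [pv_modify_items M _ _ hM, pv_filter_appRow_neg K _ _ _ hK]
        have hpure : pvPureChar K row (M.items.filter (pvKeep K)) c = M.items.filter (pvKeep K) := by
          unfold pvPureChar; rw [if_pos hK]
        obtain ⟨h1, h2⟩ := ih (M.modify (String.ofList [c]) [] (fun v => v ++ [row])) hnd
        rw [List.foldl_cons, List.foldl_cons, hstep, hpure]
        exact ⟨by rw [h1, hitems], h2⟩
    · have hK' : K.contains (String.ofList [c]) = false := by simpa using hK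
      have hFc : ¬ F.contains (String.ofList [c]) = true := by
        intro hcon
        have := hF _ hcon
        rw [hK'] at this; exact Bool.false_ne_true this
      have hstep : pvStepAChar F row M c = M.modify (String.ofList [c]) [] (fun v => v ++ [row]) := by
        unfold pvStepAChar; rw [if_neg hFc]
      have hnd := pv_nodup_keys_modify M (String.ofList [c]) [] (fun v => v ++ [row]) hM
      have hitems : (M.modify (String.ofList [c]) [] (fun v => v ++ [row])).items.filter (pvKeep K)
          = pvAppRow (M.items.filter (pvKeep K)) (String.ofList [c]) row := by
        rw [pv_modify_items M _ _ hM, pv_filter_appRow_pos K _ _ _ hK']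
      have hpure : pvPureChar K row (M.items.filter (pvKeep K)) c
          = pvAppRow (M.items.filter (pvKeep K)) (String.ofList [c]) row := by
        unfold pvPureChar; rw [if_neg (by rw [hK']; exact Bool.false_ne_true)]
      obtain ⟨h1, h2⟩ := ih (M.modify (String.ofList [c]) [] (fun v => v ++ [row])) hnd
      rw [List.foldl_cons, List.foldl_cons, hstep, hpure]
      exact ⟨by rw [h1, hitems], h2⟩

lemma pv_A_loop (K : List String) :
    ∀ (dd : List (String × List (String × Int)))
      (F : PySem.Dict String (List (String × Int)))
      (M : PySem.Dict String (List (List (String × Int)))),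
      (∀ s, F.contains s = true → K.contains s = true) →
      (∀ p ∈ dd, (PySem.Str.len p.1 == 1) = true → K.contains p.1 = true) →
      M.keys.Nodup →
      ((dd.foldl pvStepA (F, M)).2.items.filter (pvKeep K)
          = pvPure K dd (M.items.filter (pvKeep K))) := by
  intro dd
  induction dd with
  | nil => intro F M _ _ _; rfl
  | cons pr dd ih =>
    intro F M hF hl hM
    by_cases hs : (PySem.Str.len pr.1 == 1) = true
    · have hstep : pvStepA (F, M) pr = (F.insert pr.1 pr.2, M) := by
        unfold pvStepA; rw [if_pos hs]
      have hF' : ∀ s, (F.insert pr.1 pr.2).contains s = true → K.contains s = true := by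
        intro s hcon
        rw [PySem.Dict.contains_insert] at hcon
        rcases Bool.or_eq_true_iff.1 hcon with h | h
        · rw [eq_of_beq h]; exact hl pr (by simp) hs
        · exact hF s h
      rw [List.foldl_cons, hstep, pv_pure_cons_single K pr dd _ hs]
      exact ih (F.insert pr.1 pr.2) M hF' (fun p hp => hl p (by simp [hp])) hM
    · have hs' : (PySem.Str.len pr.1 == 1) = false := by simpa using hs
      have hstep : pvStepA (F, M) pr = (F, pr.1.toList.foldl (pvStepAChar F pr.2) M) := by
        unfold pvStepA; rw [if_neg hs]
      obtain ⟨h1, h2⟩ := pv_A_chars K F pr.2 hF pr.1.toList M hM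
      rw [List.foldl_cons, hstep, pv_pure_cons_multi K pr dd _ hs',
        ih F (pr.1.toList.foldl (pvStepAChar F pr.2) M) hF (fun p hp => hl p (by simp [hp])) h2, h1]

lemma pv_A_fst :
    ∀ (dd : List (String × List (String × Int)))
      (F : PySem.Dict String (List (String × Int)))
      (M : PySem.Dict String (List (List (String × Int)))),
      (dd.foldl pvStepA (F, M)).1
        = dd.foldl (fun F pr => if PySem.Str.len pr.1 == 1 then F.insert pr.1 pr.2 else F) F := by
  intro dd
  induction dd with
  | nil => intro F M; rfl
  | cons pr dd ih =>
    intro F M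
    by_cases hs : (PySem.Str.len pr.1 == 1) = true
    · have hstep : pvStepA (F, M) pr = (F.insert pr.1 pr.2, M) := by
        unfold pvStepA; rw [if_pos hs]
      rw [List.foldl_cons, List.foldl_cons, hstep, if_pos hs]
      exact ih _ _
    · have hstep : pvStepA (F, M) pr = (F, pr.1.toList.foldl (pvStepAChar F pr.2) M) := by
        unfold pvStepA; rw [if_neg hs]
      rw [List.foldl_cons, List.foldl_cons, hstep, if_neg hs]
      exact ih _ _

lemma pv_found_items :
    ∀ (dd : List (String × List (String × Int)))
      (F : PySem.Dict String (List (String × Int))),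
      (∀ a ∈ dd, (PySem.Str.len a.1 == 1) = true → F.contains a.1 = false) →
      (dd.map Prod.fst).Nodup →
      (dd.foldl (fun F pr => if PySem.Str.len pr.1 == 1 then F.insert pr.1 pr.2 else F) F).items
        = F.items ++ dd.filter (fun pr => PySem.Str.len pr.1 == 1) := by
  intro dd
  induction dd with
  | nil => intro F _ _; simp
  | cons pr dd ih =>
    intro F hfresh hnd
    have hnd' : (dd.map Prod.fst).Nodup := (List.nodup_cons.1 hnd).2
    have hnm : pr.1 ∉ dd.map Prod.fst := (List.nodup_cons.1 hnd).1
    by_cases hs : (PySem.Str.len pr.1 == 1) = true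
    · have hc : F.contains pr.1 = false := hfresh pr (by simp) hs
      have hfresh' : ∀ a ∈ dd, (PySem.Str.len a.1 == 1) = true →
          (F.insert pr.1 pr.2).contains a.1 = false := by
        intro a ha hsa
        rw [PySem.Dict.contains_insert]
        have h1 : (a.1 == pr.1) = false := by
          by_contra hcon
          have : a.1 = pr.1 := eq_of_beq (by simpa using hcon)
          exact hnm (this ▸ List.mem_map.2 ⟨a, ha, rfl⟩)
        rw [h1, hfresh a (by simp [ha]) hsa]
        rfl
      rw [List.foldl_cons, if_pos hs, ih (F.insert pr.1 pr.2) hfresh' hnd',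
        PySem.Dict.items_insert, if_neg (by rw [hc]; exact Bool.false_ne_true),
        List.filter_cons_of_pos (p := fun pr => PySem.Str.len pr.1 == 1) (l := dd) (a := pr) hs,
        List.append_assoc, List.singleton_append]
    · rw [List.foldl_cons, if_neg hs, ih F (fun a ha => hfresh a (by simp [ha])) hnd',
        List.filter_cons_of_neg (p := fun pr => PySem.Str.len pr.1 == 1) (l := dd) (a := pr) hs]

-- ===== the new B-side lemmas: pvPure = fold of the pair list = group-by =====

lemma pv_pairs_cons_single (K : List String) (pr : String × List (String × Int))
    (dd : List (String × List (String × Int))) (hs : (PySem.Str.len pr.1 == 1) = true) :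
    pvPairs K (pr :: dd) = pvPairs K dd := by
  have hs1 : pr.1.length = 1 := by simpa using hs
  unfold pvPairs
  rw [List.filter_cons_of_neg (by simp [bne, hs1])]

lemma pv_pairs_cons_multi (K : List String) (pr : String × List (String × Int))
    (dd : List (String × List (String × Int))) (hs : (PySem.Str.len pr.1 == 1) = false) :
    pvPairs K (pr :: dd)
      = ((pr.1.toList.filter (fun c => !(K.contains (String.ofList [c])))).map
          (fun c => (String.ofList [c], pr.2))) ++ pvPairs K dd := by
  have hs1 : ¬ pr.1.length = 1 := by simpa using hs
  unfold pvPairs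
  rw [List.filter_cons_of_pos (by simp [bne, hs1]), List.flatMap_cons]

lemma pv_fold_append (L1 L2 : List (String × List (String × Int)))
    (xs : List (String × List (List (String × Int)))) :
    pvFold (L1 ++ L2) xs = pvFold L2 (pvFold L1 xs) := by
  unfold pvFold; rw [List.foldl_append]

lemma pv_chars_fold (K : List String) (row : List (String × Int)) :
    ∀ (cs : List Char) (xs : List (String × List (List (String × Int)))),
      cs.foldl (pvPureChar K row) xs
        = pvFold ((cs.filter (fun c => !(K.contains (String.ofList [c])))).map
            (fun c => (String.ofList [c], row))) xs := by
  intro cs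
  induction cs with
  | nil => intro xs; rfl
  | cons c cs ih =>
    intro xs
    by_cases hK : K.contains (String.ofList [c]) = true
    · have h1 : pvPureChar K row xs c = xs := by unfold pvPureChar; rw [if_pos hK]
      rw [List.foldl_cons, h1, List.filter_cons_of_neg (by rw [hK]; simp), ih]
    · have hK' : K.contains (String.ofList [c]) = false := by simpa using hK
      have h1 : pvPureChar K row xs c = pvAppRow xs (String.ofList [c]) row := by
        unfold pvPureChar; rw [if_neg hK]
      rw [List.foldl_cons, h1, List.filter_cons_of_pos (by rw [hK']; simp), List.map_cons, ih]
      rfl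

lemma pv_pure_eq_fold (K : List String) :
    ∀ (dd : List (String × List (String × Int)))
      (xs : List (String × List (List (String × Int)))),
      pvPure K dd xs = pvFold (pvPairs K dd) xs := by
  intro dd
  induction dd with
  | nil => intro xs; rfl
  | cons pr dd ih =>
    intro xs
    by_cases hs : (PySem.Str.len pr.1 == 1) = true
    · rw [pv_pure_cons_single K pr dd xs hs, pv_pairs_cons_single K pr dd hs, ih]
    · have hs' : (PySem.Str.len pr.1 == 1) = false := by simpa using hs
      rw [pv_pure_cons_multi K pr dd xs hs', pv_pairs_cons_multi K pr dd hs',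
        pv_fold_append, ih, pv_chars_fold]

lemma pv_group_any (L : List (String × List (String × Int))) (k : String) :
    (pvGroup L).any (fun p => p.1 == k) = (L.map Prod.fst).contains k := by
  unfold pvGroup
  rw [List.any_map]
  by_cases hm : k ∈ L.map Prod.fst
  · have : k ∈ PySem.Set.ofList (L.map Prod.fst) := (PySem.Set.mem_ofList _ _).2 hm
    simp only [List.contains_iff_mem.2 hm]
    exact List.any_eq_true.2 ⟨k, this, by simp⟩
  · have h2 : (L.map Prod.fst).contains k = false := by
      by_contra h; exact hm (List.contains_iff_mem.1 (by simpa using h))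
    rw [h2]
    apply List.any_eq_false.2
    intro c hc
    have : c ∈ L.map Prod.fst := (PySem.Set.mem_ofList _ _).1 hc
    have hne : ¬ c = k := fun hh => hm (hh ▸ this)
    simpa using hne

lemma pv_fold_eq_group : ∀ (L : List (String × List (String × Int))),
    pvFold L [] = pvGroup L := by
  intro L
  induction L using List.reverseRecOn with
  | nil => rfl
  | append_singleton L q ih =>
    rw [pv_fold_append, ih]
    unfold pvFold
    rw [List.foldl_cons, List.foldl_nil]
    unfold pvAppRow
    rw [pv_group_any]
    unfold pvGroup
    rw [List.map_append, List.map_cons, List.map_nil,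
      PySem.Set.ofList_append_singleton]
    by_cases hm : q.1 ∈ L.map Prod.fst
    · have hcont : (PySem.Set.ofList (L.map Prod.fst)).contains q.1 = true := by
        rw [PySem.Set.contains_iff]; exact (PySem.Set.mem_ofList _ _).2 hm
      rw [List.contains_iff_mem.2 hm, if_pos rfl, PySem.Set.add, if_pos hcont, List.map_map]
      apply List.map_congr_left
      intro c hc
      by_cases hck : (c == q.1) = true
      · have hceq : c = q.1 := eq_of_beq hck
        simp only [Function.comp, hck, if_pos]
        rw [hceq, List.filter_append, List.map_append]
        simp
      · have hcne : ¬ c = q.1 := fun hh => hck (by simp [hh])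
        simp only [Function.comp, hck]
        rw [if_neg Bool.false_ne_true, List.filter_append]
        have : (([q].filter (fun p => p.1 == c)) : List (String × List (String × Int))) = [] := by
          simp [show ¬ q.1 = c from fun hh => hcne hh.symm]
        rw [this, List.append_nil]
    · have h2 : (L.map Prod.fst).contains q.1 = false := by
        by_contra h; exact hm (List.contains_iff_mem.1 (by simpa using h))
      have hcf : (PySem.Set.ofList (L.map Prod.fst)).contains q.1 = false := by
        by_contra h
        exact hm ((PySem.Set.mem_ofList _ _).1
          ((PySem.Set.contains_iff _ _).1 (by simpa using h)))
      rw [h2, if_neg (by simp), PySem.Set.add,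
        if_neg (by rw [hcf]; exact Bool.false_ne_true), List.map_append]
      congr 1
      · apply List.map_congr_left
        intro c hc
        have hcm : c ∈ L.map Prod.fst := (PySem.Set.mem_ofList _ _).1 hc
        have hcne : ¬ c = q.1 := fun hh => hm (hh ▸ hcm)
        rw [List.filter_append]
        have : (([q].filter (fun p => p.1 == c)) : List (String × List (String × Int))) = [] := by
          simp [show ¬ q.1 = c from fun hh => hcne hh.symm]
        rw [this, List.append_nil]
      · have hfil : L.filter (fun p => p.1 == q.1) = [] := by
          apply List.filter_eq_nil_iff.2
          intro p hp
          have : p.1 ∈ L.map Prod.fst := List.mem_map.2 ⟨p, hp, rfl⟩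
          intro hcon
          exact hm (eq_of_beq hcon ▸ this)
        rw [List.map_cons, List.map_nil, List.filter_append, hfil, List.nil_append]
        simp

-- ===== VERDICT (by name: the statement is the Claim_ definition above) =====
theorem find_unigraphs_in_dictdict_spec : Claim_equal_find_unigraphs_in_dictdict := by
  intro dd _ hpre
  unfold Spec_find_unigraphs_in_dictdict
  unfold find_unigraphs_in_dictdict find_unigraphs_in_dictdict_alt
  have hpre' : (dd.map Prod.fst).Nodup := hpre
  have hfst := pv_A_fst dd PySem.Dict.empty PySem.Dict.empty
  have hfound : (dd.foldl pvStepA (PySem.Dict.empty, PySem.Dict.empty)).1.items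
      = dd.filter (fun pr => PySem.Str.len pr.1 == 1) := by
    rw [hfst, pv_found_items dd PySem.Dict.empty
      (fun a _ _ => PySem.Dict.contains_empty a.1) hpre']
    exact List.nil_append _
  have hkeys : (dd.foldl pvStepA (PySem.Dict.empty, PySem.Dict.empty)).1.keys
      = (dd.filter (fun pr => PySem.Str.len pr.1 == 1)).map Prod.fst := by
    show (dd.foldl pvStepA (PySem.Dict.empty, PySem.Dict.empty)).1.items.map _ = _
    rw [hfound]
  set K := (dd.filter (fun pr => PySem.Str.len pr.1 == 1)).map Prod.fst with hK
  have hl : ∀ p ∈ dd, (PySem.Str.len p.1 == 1) = true → K.contains p.1 = true := by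
    intro p hp hs
    have : p.1 ∈ K := List.mem_map.2 ⟨p, List.mem_filter.2 ⟨hp, hs⟩, rfl⟩
    exact List.contains_iff_mem.2 this
  have hemptyk : ((PySem.Dict.empty : PySem.Dict String (List (List (String × Int)))).keys).Nodup := List.nodup_nil
  have hA := pv_A_loop K dd PySem.Dict.empty PySem.Dict.empty
    (fun s h => absurd h (by rw [PySem.Dict.contains_empty]; exact Bool.false_ne_true)) hl hemptyk
  have hclean := pv_cleanup_items ((dd.foldl pvStepA (PySem.Dict.empty, PySem.Dict.empty)).1.keys)
    (dd.foldl pvStepA (PySem.Dict.empty, PySem.Dict.empty)).2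
  refine Prod.ext ?_ ?_
  · simpa using hfound
  · show ((dd.foldl pvStepA (PySem.Dict.empty, PySem.Dict.empty)).1.keys.foldl
        (fun m c => if m.contains c then m.erase c else m)
        (dd.foldl pvStepA (PySem.Dict.empty, PySem.Dict.empty)).2).items
      = pvGroup (pvPairs K dd)
    rw [hclean, hkeys]
    calc (dd.foldl pvStepA (PySem.Dict.empty, PySem.Dict.empty)).2.items.filter
          (fun p => !(K.contains p.1))
        = (dd.foldl pvStepA (PySem.Dict.empty, PySem.Dict.empty)).2.items.filter (pvKeep K) := rfl
      _ = pvPure K dd [] := hA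
      _ = pvFold (pvPairs K dd) [] := pv_pure_eq_fold K dd []
      _ = pvGroup (pvPairs K dd) := pv_fold_eq_group _
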